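-- pv_equiv track=rewrite | github.com/Kattenelvis/Discrete-Entropy-Calculations | distance_matricies.py | calculate_shortest_distance_matrix
-- ===== SOURCE A (Python) =====
-- def calculate_shortest_distance_matrix(distance_matricies):
--
--     x_size = len(distance_matricies[0])
--     y_size = len(distance_matricies[0][0])
--
--     added_shortest_distances = 0
--     shortest_distance_matrix = [[0 for _ in range(x_size)] for _ in range(y_size)]
--
--     for x in range(x_size):
--         for y in range(y_size):
--             distances = [distance_matrix[y][x] for distance_matrix in distance_matricies]
--             shortest_distance_matrix[y][x] = min(distances)
--             added_shortest_distances += min(distances)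
--
--     return shortest_distance_matrix, added_shortest_distances
-- ===== SOURCE B (Python) =====
-- def calculate_shortest_distance_matrix(distance_matricies):
--     first = distance_matricies[0]
--     x_size = len(first)
--     y_size = len(first[0])
--     result = [[first[y][x] for x in range(x_size)] for y in range(y_size)]
--     for M in distance_matricies[1:]:
--         for y in range(y_size):
--             for x in range(x_size):
--                 v = M[y][x]
--                 if v < result[y][x]:
--                     result[y][x] = v
--     total = sum(v for row in result for v in row)
--     return result, total
-- ===== Notes on version B (the rewrite author's own statement) =====
-- stated objective: faster
-- what changed: B seeds the result with the first matrix and folds the remaining matrices pairwise into a running elementwise minimum with a conditional in-place update, summing in a separate pass, instead of A's per-cell column-major scan that builds a fresh k-element list and calls min() twice for every cell; same O(k*x*y) asymptotics but a large constant factor (no per-cell list allocation, row-major access).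
import Mathlib
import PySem

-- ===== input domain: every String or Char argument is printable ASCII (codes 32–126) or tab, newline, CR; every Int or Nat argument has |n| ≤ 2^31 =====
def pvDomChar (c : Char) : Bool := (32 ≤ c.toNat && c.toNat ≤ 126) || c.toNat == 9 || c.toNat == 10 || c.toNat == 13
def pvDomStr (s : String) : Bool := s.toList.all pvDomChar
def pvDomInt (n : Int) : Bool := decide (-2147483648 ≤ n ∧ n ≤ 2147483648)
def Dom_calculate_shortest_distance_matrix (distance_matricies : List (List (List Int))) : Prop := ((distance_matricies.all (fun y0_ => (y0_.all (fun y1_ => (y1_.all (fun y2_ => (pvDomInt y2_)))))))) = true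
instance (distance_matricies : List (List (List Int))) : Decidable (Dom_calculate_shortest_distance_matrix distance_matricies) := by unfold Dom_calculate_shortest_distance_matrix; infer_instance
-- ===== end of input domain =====

-- B folds the matrices pairwise into a running elementwise-minimum matrix (seeded with the
-- first matrix) and sums it in a separate pass, instead of A's per-cell scan over all matrices.

-- ===== PORT A =====
-- Python's min(nonempty list); [] never reached inside Pre_ (Python raises there)
def pyMinList (l : List Int) : Int :=
  match l with
  | [] => 0
  | h :: t => t.foldl min h

def calculate_shortest_distance_matrix (distance_matricies : List (List (List Int))) : List (List Int) × Int :=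
  let x_size : Nat := (distance_matricies.getD 0 []).length
  let y_size : Nat := ((distance_matricies.getD 0 []).getD 0 []).length
  let init : List (List Int) := List.replicate y_size (List.replicate x_size 0)
  (List.range x_size).foldl (fun (st : List (List Int) × Int) x =>
      (List.range y_size).foldl (fun (st : List (List Int) × Int) y =>
        let m := pyMinList (distance_matricies.map (fun M => (M.getD y []).getD x 0))
        (st.1.set y ((st.1.getD y []).set x m), st.2 + m)) st)
    (init, 0)

-- ===== PORT B =====
def bMinStep (y_size x_size : Nat) (res : List (List Int)) (M : List (List Int)) : List (List Int) :=
  (List.range y_size).foldl (fun res y =>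
    (List.range x_size).foldl (fun res x =>
      let v := (M.getD y []).getD x 0
      if v < (res.getD y []).getD x 0 then res.set y ((res.getD y []).set x v) else res) res) res

def calculate_shortest_distance_matrix_alt (distance_matricies : List (List (List Int))) : List (List Int) × Int :=
  let first := distance_matricies.getD 0 []
  let x_size := first.length
  let y_size := (first.getD 0 []).length
  let result0 := (List.range y_size).map (fun y => (List.range x_size).map (fun x => (first.getD y []).getD x 0))
  let result := (distance_matricies.drop 1).foldl (bMinStep y_size x_size) result0
  (result, result.foldl (fun s row => row.foldl (· + ·) s) 0)

-- ===== PRECONDITION & SPEC =====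
-- Pre_ excludes exactly the inputs where Python A raises (IndexError): an empty list of
-- matrices, an empty first matrix, or a matrix too small for the indices A reads.
def Pre_calculate_shortest_distance_matrix (distance_matricies : List (List (List Int))) : Prop :=
  match distance_matricies with
  | [] => False
  | M0 :: _ =>
    M0 ≠ [] ∧
    ∀ M ∈ distance_matricies, (M0.headD []).length ≤ M.length ∧
      ∀ row ∈ M.take (M0.headD []).length, M0.length ≤ row.length

instance (distance_matricies : List (List (List Int))) : Decidable (Pre_calculate_shortest_distance_matrix distance_matricies) := by
  unfold Pre_calculate_shortest_distance_matrix
  cases distance_matricies <;> infer_instance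

def pvWitness_calculate_shortest_distance_matrix : List (List (List Int)) :=
  [[[1, 5], [3, 0]], [[2, 2], [4, -1]]]

def Spec_calculate_shortest_distance_matrix (distance_matricies : List (List (List Int))) (out : List (List Int) × Int) : Prop := out = calculate_shortest_distance_matrix_alt distance_matricies
instance (distance_matricies : List (List (List Int))) (out : List (List Int) × Int) : Decidable (Spec_calculate_shortest_distance_matrix distance_matricies out) := by unfold Spec_calculate_shortest_distance_matrix; infer_instance

-- ===== CLAIM (what is proved, stated in full; the proofs are below) =====
def Claim_equal_calculate_shortest_distance_matrix : Prop := ∀ (distance_matricies : List (List (List Int))), Dom_calculate_shortest_distance_matrix distance_matricies → Pre_calculate_shortest_distance_matrix distance_matricies → Spec_calculate_shortest_distance_matrix distance_matricies (calculate_shortest_distance_matrix distance_matricies)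

-- ===== LEMMAS AND PROOFS =====

-- generic helpers --------------------------------------------------------
theorem pv_getD_map_range {α : Type} (n i : Nat) (f : Nat → α) (d : α) (h : i < n) :
    ((List.range n).map f).getD i d = f i := by
  simp [List.getD_eq_getElem?_getD, List.getElem?_eq_getElem, h]

theorem pv_getD_eq_getElem {α : Type} (l : List α) (i : Nat) (d : α) (h : i < l.length) :
    l.getD i d = l[i] := by
  simp [List.getD_eq_getElem?_getD, List.getElem?_eq_getElem, h]

theorem pv_pair_split {α β : Type} (l : List α) (F : β → α → β) (c : α → Int)
    (m0 : β) (a0 : Int) :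
    l.foldl (fun st i => (F st.1 i, st.2 + c i)) (m0, a0) = (l.foldl F m0, a0 + (l.map c).sum) := by
  induction l generalizing m0 a0 with
  | nil => simp
  | cons x t ih => simp [ih, add_assoc]

-- a fold over `range k` whose step rewrites row y from its current value,
-- on a list of length ≥ k, is the row-by-row map
theorem pv_rowwise_fold {α : Type} (k : Nat) (d : α) (G : List α → Nat → List α)
    (g : Nat → α → α)
    (hG : ∀ (m : List α) (y : Nat), y < m.length → G m y = m.set y (g y (m.getD y d))) :
    ∀ (m : List α), k ≤ m.length →
      (List.range k).foldl G m = (List.range k).map (fun y => g y (m.getD y d)) ++ m.drop k := by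
  induction k with
  | zero => intro m _; simp
  | succ k ih =>
    intro m hm
    have hk : k < m.length := Nat.lt_of_lt_of_le (Nat.lt_succ_self k) hm
    rw [List.range_succ, List.foldl_append, List.foldl_cons, List.foldl_nil,
        ih m (Nat.le_of_succ_le hm)]
    rw [List.drop_eq_getElem_cons hk]
    have hlen : ((List.range k).map (fun y => g y (m.getD y d))).length = k := by simp
    have hget : (((List.range k).map (fun y => g y (m.getD y d))) ++ m[k] :: m.drop (k+1)).getD k d = m[k] := by
      rw [pv_getD_eq_getElem]
      · rw [List.getElem_append_right (by omega)]
        simp [hlen]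
      · simp [hlen]; omega
    have hklen : k < (((List.range k).map (fun y => g y (m.getD y d))) ++ m[k] :: m.drop (k+1)).length := by
      simp [hlen]; omega
    rw [hG _ k hklen, hget, List.set_append_right _ _ (by omega), hlen, Nat.sub_self]
    simp only [List.range_succ, List.map_append, List.append_assoc, List.map_cons, List.map_nil,
      List.set_cons_zero, List.singleton_append, List.cons_append, List.nil_append]
    rw [pv_getD_eq_getElem m k d hk]


-- B's inner x-fold only touches row y: it equals setting row y to a row-level fold
theorem pv_cellfold_row (w : Nat → Int) :
    ∀ (l : List Nat) (res : List (List Int)) (y : Nat), y < res.length →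
    l.foldl (fun res x => if w x < (res.getD y []).getD x 0
                          then res.set y ((res.getD y []).set x (w x)) else res) res
    = res.set y (l.foldl (fun r x => if w x < r.getD x 0 then r.set x (w x) else r) (res.getD y [])) := by
  intro l
  induction l with
  | nil =>
    intro res y hy
    simp only [List.foldl_nil]
    rw [pv_getD_eq_getElem _ _ _ hy, List.set_getElem_self]
  | cons x t ih =>
    intro res y hy
    simp only [List.foldl_cons]
    by_cases hc : w x < (res.getD y []).getD x 0
    · rw [if_pos hc, if_pos hc, ih _ y (by simpa using hy), List.set_set]
      have hA : (res.set y ((res.getD y []).set x (w x))).getD y []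
          = (res.getD y []).set x (w x) := by
        rw [List.getD_eq_getElem?_getD, List.getElem?_set_self (by simpa using hy)]
        rfl
      rw [hA]
    · rw [if_neg hc, if_neg hc, ih _ y hy]

-- A's outer x-fold commutes with the row decomposition
theorem pv_A_matrix (f : Nat → Nat → Int) (ys : Nat) :
    ∀ (l : List Nat) (m : List (List Int)), m.length = ys →
    l.foldl (fun m x => (List.range ys).foldl
        (fun m y => m.set y ((m.getD y []).set x (f y x))) m) m
    = (List.range ys).map (fun y => l.foldl (fun r x => r.set x (f y x)) (m.getD y [])) := by
  intro l
  induction l with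
  | nil =>
    intro m hm
    simp only [List.foldl_nil]
    refine List.ext_getElem (by simp [hm]) ?_
    intro i h1 h2
    simp [pv_getD_eq_getElem m i [] h1, List.getElem?_eq_getElem h1]
  | cons x t ih =>
    intro m hm
    simp only [List.foldl_cons]
    rw [pv_rowwise_fold ys [] _ (fun y r => r.set x (f y x)) (fun m y _ => rfl) m (le_of_eq hm.symm),
        show m.drop ys = [] from by simp [← hm], List.append_nil, ih _ (by simp)]
    refine List.map_congr_left ?_
    intro y hy
    rw [pv_getD_map_range ys y _ [] (List.mem_range.mp hy)]

theorem pv_B_row (xs : Nat) (w : Nat → Int) (r : List Int) (h : xs ≤ r.length) :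
    (List.range xs).foldl (fun r x => if w x < r.getD x 0 then r.set x (w x) else r) r
    = (List.range xs).map (fun x => min (w x) (r.getD x 0)) ++ r.drop xs := by
  refine pv_rowwise_fold xs 0 _ (fun x a => min (w x) a) ?_ r h
  intro r x hx
  dsimp only
  by_cases hc : w x < r.getD x 0
  · rw [if_pos hc, min_eq_left (le_of_lt hc)]
  · rw [if_neg hc, min_eq_right (le_of_not_gt hc)]
    rw [pv_getD_eq_getElem _ _ _ hx, List.set_getElem_self]

theorem pv_B_step (ys xs : Nat) (h : Nat → Nat → Int) (M : List (List Int)) :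
    bMinStep ys xs ((List.range ys).map (fun y => (List.range xs).map (h y))) M
    = (List.range ys).map (fun y => (List.range xs).map (fun x =>
        min ((M.getD y []).getD x 0) (h y x))) := by
  unfold bMinStep
  rw [pv_rowwise_fold ys [] _
      (fun y r => (List.range xs).foldl
        (fun r x => if (M.getD y []).getD x 0 < r.getD x 0 then r.set x ((M.getD y []).getD x 0) else r) r)
      (fun res y hy => pv_cellfold_row _ (List.range xs) res y hy)
      _ (by simp)]
  rw [show ((List.range ys).map (fun y => (List.range xs).map (h y))).drop ys = [] from by simp,
      List.append_nil]
  refine List.map_congr_left ?_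
  intro y hy
  rw [pv_getD_map_range _ _ _ _ (List.mem_range.mp hy),
      pv_B_row xs _ _ (by simp)]
  rw [show ((List.range xs).map (h y)).drop xs = [] from by simp, List.append_nil]
  refine List.map_congr_left ?_
  intro x hx
  rw [pv_getD_map_range _ _ _ _ (List.mem_range.mp hx)]

theorem pv_B_mats (ys xs : Nat) :
    ∀ (ms : List (List (List Int))) (h : Nat → Nat → Int),
    ms.foldl (bMinStep ys xs) ((List.range ys).map (fun y => (List.range xs).map (h y)))
    = (List.range ys).map (fun y => (List.range xs).map (fun x =>
        (ms.map (fun M => (M.getD y []).getD x 0)).foldl min (h y x))) := by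
  intro ms
  induction ms with
  | nil => intro h; simp
  | cons M t ih =>
    intro h
    rw [List.foldl_cons, pv_B_step, ih (fun y x => min ((M.getD y []).getD x 0) (h y x))]
    refine List.map_congr_left ?_
    intro y _
    refine List.map_congr_left ?_
    intro x _
    simp [min_comm]

theorem pv_foldl_add : ∀ (r : List Int) (s : Int), r.foldl (· + ·) s = s + r.sum := by
  intro r
  induction r with
  | nil => simp
  | cons a t ih => intro s; simp [ih, add_assoc]

theorem pv_matfold_sum : ∀ (T : List (List Int)) (s : Int),
    T.foldl (fun s row => row.foldl (· + ·) s) s = s + (T.map List.sum).sum := by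
  intro T
  induction T with
  | nil => simp
  | cons r t ih =>
    intro s
    rw [List.foldl_cons, pv_foldl_add, ih]
    simp [add_assoc]

theorem pv_sum_map_range : ∀ (n : Nat) (f : Nat → Int),
    ((List.range n).map f).sum = ∑ i ∈ Finset.range n, f i := by
  intro n f
  induction n with
  | zero => simp
  | succ n ih => simp [List.range_succ, Finset.sum_range_succ, ih]

theorem pv_sum_swap (a b : Nat) (f : Nat → Nat → Int) :
    ((List.range a).map (fun x => ((List.range b).map (fun y => f x y)).sum)).sum
    = ((List.range b).map (fun y => ((List.range a).map (fun x => f x y)).sum)).sum := by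
  simp only [pv_sum_map_range]
  exact Finset.sum_comm

theorem pv_A_eq (dm : List (List (List Int))) :
    calculate_shortest_distance_matrix dm =
    ((List.range ((dm.getD 0 []).getD 0 []).length).map (fun y =>
        (List.range (dm.getD 0 []).length).map (fun x =>
          pyMinList (dm.map (fun M => (M.getD y []).getD x 0)))),
     ((List.range (dm.getD 0 []).length).map (fun x =>
        ((List.range ((dm.getD 0 []).getD 0 []).length).map (fun y =>
          pyMinList (dm.map (fun M => (M.getD y []).getD x 0)))).sum)).sum) := by
  unfold calculate_shortest_distance_matrix
  dsimp only
  have h1 : (fun (st : List (List Int) × Int) x =>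
      (List.range ((dm.getD 0 []).getD 0 []).length).foldl (fun st y =>
        (st.1.set y ((st.1.getD y []).set x (pyMinList (dm.map (fun M => (M.getD y []).getD x 0)))),
         st.2 + pyMinList (dm.map (fun M => (M.getD y []).getD x 0)))) st)
    = (fun (st : List (List Int) × Int) x =>
      ((List.range ((dm.getD 0 []).getD 0 []).length).foldl
          (fun m y => m.set y ((m.getD y []).set x (pyMinList (dm.map (fun M => (M.getD y []).getD x 0))))) st.1,
       st.2 + ((List.range ((dm.getD 0 []).getD 0 []).length).map
          (fun y => pyMinList (dm.map (fun M => (M.getD y []).getD x 0)))).sum)) := by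
    funext st x
    obtain ⟨m0, a0⟩ := st
    exact pv_pair_split (List.range ((dm.getD 0 []).getD 0 []).length)
      (fun m y => m.set y ((m.getD y []).set x (pyMinList (dm.map (fun M => (M.getD y []).getD x 0)))))
      (fun y => pyMinList (dm.map (fun M => (M.getD y []).getD x 0))) m0 a0
  rw [h1, pv_pair_split (List.range (dm.getD 0 []).length)
      (fun m x => List.foldl (fun m y => m.set y ((m.getD y []).set x
          (pyMinList (dm.map (fun M => (M.getD y []).getD x 0))))) m
        (List.range ((dm.getD 0 []).getD 0 []).length))
      (fun x => ((List.range ((dm.getD 0 []).getD 0 []).length).map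
          (fun y => pyMinList (dm.map (fun M => (M.getD y []).getD x 0)))).sum)
      (List.replicate ((dm.getD 0 []).getD 0 []).length (List.replicate (dm.getD 0 []).length 0)) 0,
      pv_A_matrix _ _ _ _ (by simp)]
  refine Prod.ext ?_ (zero_add _)
  refine List.map_congr_left ?_
  intro y hy
  have hy' := List.mem_range.mp hy
  have hrow : (List.replicate ((dm.getD 0 []).getD 0 []).length
      (List.replicate (dm.getD 0 []).length (0:Int))).getD y []
      = List.replicate (dm.getD 0 []).length (0:Int) := by
    rw [List.getD_eq_getElem?_getD, List.getElem?_replicate, if_pos hy']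
    rfl
  rw [hrow, pv_rowwise_fold _ 0 _
      (fun x _ => pyMinList (dm.map (fun M => (M.getD y []).getD x 0)))
      (fun r x _ => rfl) _ (by simp)]
  simp


theorem pv_B_eq (M0 : List (List Int)) (rest : List (List (List Int))) :
    calculate_shortest_distance_matrix_alt (M0 :: rest)
    = ((List.range (M0.getD 0 []).length).map (fun y =>
          (List.range M0.length).map (fun x =>
            pyMinList ((M0 :: rest).map (fun M => (M.getD y []).getD x 0)))),
       ((List.range (M0.getD 0 []).length).map (fun y =>
          ((List.range M0.length).map (fun x =>
            pyMinList ((M0 :: rest).map (fun M => (M.getD y []).getD x 0)))).sum)).sum) := by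
  unfold calculate_shortest_distance_matrix_alt
  dsimp only
  rw [show (M0 :: rest).getD 0 [] = M0 from rfl, show (M0 :: rest).drop 1 = rest from rfl,
      pv_B_mats (M0.getD 0 []).length M0.length rest (fun y x => (M0.getD y []).getD x 0),
      pv_matfold_sum, zero_add, List.map_map]
  simp [pyMinList, Function.comp_def]

-- ===== VERDICT (by name: the statement is the Claim_ definition above) =====
theorem calculate_shortest_distance_matrix_spec : Claim_equal_calculate_shortest_distance_matrix := by
  intro dm _ hpre
  unfold Spec_calculate_shortest_distance_matrix
  cases dm with
  | nil =>
    unfold Pre_calculate_shortest_distance_matrix at hpre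
    exact hpre.elim
  | cons M0 rest =>
    rw [pv_A_eq, pv_B_eq]
    refine Prod.ext rfl ?_
    exact pv_sum_swap M0.length (M0.getD 0 []).length
      (fun x y => pyMinList ((M0 :: rest).map (fun M => (M.getD y []).getD x 0)))
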